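-- pv_equiv track=rewrite | github.com/tomofumikitano/adventofcode2020 | day24/day24.py | black_to_black
-- ===== SOURCE A (Python) =====
-- MOVE = {
--     'ne': (0, 1),
--     'e': (1, 0),
--     'se': (1, -1),
--     'nw': (-1, 1),
--     'w': (-1, 0),
--     'sw': (0, -1),
-- }
--
-- def count_adjacent_blacks(tile, blacks):
--     count = 0
--     for delta in MOVE.values():
--         if (tile[0] + delta[0], tile[1] + delta[1]) in blacks:
--             count += 1
--     return count
--
-- def black_to_black(blacks):
--     new_black_tiles = set()
--     for tile in blacks:
--         count = count_adjacent_blacks(tile, blacks)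
--         if count == 0 or count > 2:
--             pass
--         else:
--             new_black_tiles.add(tile)
--     return new_black_tiles
-- ===== SOURCE B (Python) =====
-- MOVE = {
--     'ne': (0, 1),
--     'e': (1, 0),
--     'se': (1, -1),
--     'nw': (-1, 1),
--     'w': (-1, 0),
--     'sw': (0, -1),
-- }
--
-- def black_to_black(blacks):
--     # Scatter: each distinct black tile adds 1 to each of its 6 neighbors' counts,
--     # then keep the black tiles whose accumulated count is 1 or 2.
--     counts = {}
--     for tile in dict.fromkeys(blacks):
--         for dx, dy in MOVE.values():
--             key = (tile[0] + dx, tile[1] + dy)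
--             counts[key] = counts.get(key, 0) + 1
--     return {tile for tile in blacks if counts.get(tile, 0) in (1, 2)}
-- ===== Notes on version B (the rewrite author's own statement) =====
-- stated objective: alternative
-- what changed: A gathers: for each tile it scans the whole blacks list once per direction to count black neighbors; B scatters: it builds a neighbor-count dictionary in one pass over the distinct tiles and then filters the tiles by counts.get(tile, 0) in (1, 2).
import Mathlib
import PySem

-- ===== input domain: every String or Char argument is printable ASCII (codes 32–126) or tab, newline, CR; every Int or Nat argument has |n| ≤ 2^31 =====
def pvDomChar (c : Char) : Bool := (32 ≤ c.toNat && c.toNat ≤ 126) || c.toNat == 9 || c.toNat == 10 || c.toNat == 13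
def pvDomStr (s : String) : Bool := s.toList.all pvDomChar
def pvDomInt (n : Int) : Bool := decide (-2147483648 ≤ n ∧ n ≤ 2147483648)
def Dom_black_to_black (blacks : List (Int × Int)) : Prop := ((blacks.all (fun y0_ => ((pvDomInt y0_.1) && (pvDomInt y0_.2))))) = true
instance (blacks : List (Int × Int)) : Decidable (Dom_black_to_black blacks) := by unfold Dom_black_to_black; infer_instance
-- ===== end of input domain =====

-- B replaces A's per-tile scan of the whole list by a scatter pass that builds a
-- neighbor-count dictionary once and then filters the tiles (alternative decomposition).


-- ===== PORT A =====
-- MOVE.values() in insertion order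
def pvMoves : List (Int × Int) := [(0, 1), (1, 0), (1, -1), (-1, 1), (-1, 0), (0, -1)]

def count_adjacent_blacks (tile : Int × Int) (blacks : List (Int × Int)) : Int :=
  pvMoves.foldl (fun count delta =>
    if (tile.1 + delta.1, tile.2 + delta.2) ∈ blacks then count + 1 else count) 0

def black_to_black (blacks : List (Int × Int)) : List (Int × Int) :=
  blacks.foldl (fun new_black_tiles tile =>
    let count := count_adjacent_blacks tile blacks
    if count = 0 ∨ 2 < count then new_black_tiles else PySem.Set.add new_black_tiles tile)
    PySem.Set.empty

-- ===== PORT B =====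
-- counts[key] = counts.get(key, 0) + 1, scattered from every distinct black tile
def pvCounts (blacks : List (Int × Int)) : PySem.Dict (Int × Int) Int :=
  (PySem.List.dedup blacks).foldl
    (fun counts tile =>
      pvMoves.foldl (fun counts d =>
        counts.modify (tile.1 + d.1, tile.2 + d.2) 0 (· + 1)) counts)
    PySem.Dict.empty

def black_to_black_alt (blacks : List (Int × Int)) : List (Int × Int) :=
  let counts := pvCounts blacks
  blacks.foldl (fun s tile =>
    if counts.getD tile 0 = 1 ∨ counts.getD tile 0 = 2 then PySem.Set.add s tile else s)
    PySem.Set.empty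

-- ===== PRECONDITION & SPEC =====
def Spec_black_to_black (blacks : List (Int × Int)) (out : List (Int × Int)) : Prop := out = black_to_black_alt blacks
instance (blacks : List (Int × Int)) (out : List (Int × Int)) : Decidable (Spec_black_to_black blacks out) := by unfold Spec_black_to_black; infer_instance

-- ===== CLAIM (what is proved, stated in full; the proofs are below) =====
def Claim_equal_black_to_black : Prop := ∀ (blacks : List (Int × Int)), Dom_black_to_black blacks → Spec_black_to_black blacks (black_to_black blacks)

-- ===== LEMMAS AND PROOFS =====

-- counting elements of a nodup list that fall in a nodup list is symmetric
theorem pv_countP_or_mem (x : Int × Int) (l : List (Int × Int)) (hx : x ∉ l) :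
    ∀ (r : List (Int × Int)), r.Nodup →
      r.countP (fun t => decide (t = x) || decide (t ∈ l)) =
      r.countP (fun t => decide (t ∈ l)) + (if x ∈ r then 1 else 0) := by
  intro r hr
  induction r with
  | nil => simp
  | cons y r' ih =>
    rcases List.nodup_cons.mp hr with ⟨hy, hr'⟩
    by_cases hyx : y = x
    · subst hyx
      have h1 : List.countP (fun t => decide (t = y) || decide (t ∈ l)) r' =
          List.countP (fun t => decide (t ∈ l)) r' := by
        apply List.countP_congr
        intro a ha
        have : a ≠ y := fun h => hy (h ▸ ha)
        simp [this]
      simp [h1, hx, hy]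
    · by_cases hxr : x ∈ r' <;>
        simp [List.countP_cons, ih hr', hyx, hxr, Ne.symm hyx] <;> try omega

theorem pv_countP_mem_comm (l r : List (Int × Int))
    (hl : l.Nodup) (hr : r.Nodup) :
    l.countP (fun t => decide (t ∈ r)) = r.countP (fun t => decide (t ∈ l)) := by
  induction l with
  | nil => simp
  | cons x l ih =>
    rcases List.nodup_cons.mp hl with ⟨hx, hl'⟩
    have h1 := pv_countP_or_mem x l hx r hr
    have h2 : List.countP (fun t => decide (t ∈ x :: l)) r =
        List.countP (fun t => decide (t = x) || decide (t ∈ l)) r := by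
      apply List.countP_congr; intro a _; simp [List.mem_cons]
    simp [List.countP_cons, ih hl', h1]

-- the 6 hex neighbors of a tile (proof-side view of the scatter targets)
def pvNbrs (tile : Int × Int) : List (Int × Int) :=
  pvMoves.map (fun d => (tile.1 + d.1, tile.2 + d.2))

theorem pv_mem_nbrs_symm (t tile : Int × Int) : tile ∈ pvNbrs t ↔ t ∈ pvNbrs tile := by
  rcases t with ⟨a, b⟩; rcases tile with ⟨c, d⟩
  simp [pvNbrs, pvMoves, Prod.ext_iff]
  omega

theorem pv_nodup_nbrs (t : Int × Int) : (pvNbrs t).Nodup := by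
  rcases t with ⟨a, b⟩
  simp [pvNbrs, pvMoves, Prod.ext_iff]

theorem pv_count_nbrs (t tile : Int × Int) :
    List.count tile (pvNbrs t) = if t ∈ pvNbrs tile then 1 else 0 := by
  rw [List.Nodup.count (pv_nodup_nbrs t), if_congr (pv_mem_nbrs_symm t tile) rfl rfl]

theorem pv_count_flatMap (tile : Int × Int) (l : List (Int × Int)) :
    List.count tile (l.flatMap pvNbrs) = l.countP (fun t => decide (t ∈ pvNbrs tile)) := by
  induction l with
  | nil => simp
  | cons x l ih =>
    simp [List.count_append, ih, pv_count_nbrs, List.countP_cons]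
    omega

theorem pv_counts_eq_counter (blacks : List (Int × Int)) :
    pvCounts blacks = PySem.Dict.counter ((PySem.List.dedup blacks).flatMap pvNbrs) := by
  unfold pvCounts
  rw [PySem.Dict.counter_eq_foldl, List.foldl_flatMap]
  simp [pvNbrs, List.foldl_map]

-- A's gathered neighbor count equals B's scattered count-table entry
theorem pv_count_eq (tile : Int × Int) (blacks : List (Int × Int)) :
    count_adjacent_blacks tile blacks = (pvCounts blacks).getD tile 0 := by
  rw [pv_counts_eq_counter, PySem.Dict.getD_counter, pv_count_flatMap]
  have hcomm := pv_countP_mem_comm (PySem.List.dedup blacks) (pvNbrs tile)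
    (PySem.List.nodup_dedup blacks) (pv_nodup_nbrs tile)
  rw [hcomm]
  have h1 : List.countP (fun t => decide (t ∈ PySem.List.dedup blacks)) (pvNbrs tile) =
      List.countP (fun t => decide (t ∈ blacks)) (pvNbrs tile) := by
    apply List.countP_congr; intro a _; simp
  rw [h1]
  unfold count_adjacent_blacks
  have h := PySem.List.foldl_count_if
    (fun delta : Int × Int => decide ((tile.1 + delta.1, tile.2 + delta.2) ∈ blacks)) pvMoves 0
  simp only [decide_eq_true_eq] at h
  rw [h]
  simp [pvNbrs, List.countP_map, Function.comp_def]

-- ===== VERDICT (by name: the statement is the Claim_ definition above) =====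
theorem black_to_black_spec : Claim_equal_black_to_black := by
  intro blacks _
  unfold Spec_black_to_black black_to_black black_to_black_alt
  have hf : (fun (s : PySem.Set (Int × Int)) (tile : Int × Int) =>
        let count := count_adjacent_blacks tile blacks
        if count = 0 ∨ 2 < count then s else PySem.Set.add s tile) =
      (fun s tile =>
        if (pvCounts blacks).getD tile 0 = 1 ∨ (pvCounts blacks).getD tile 0 = 2 then
          PySem.Set.add s tile else s) := by
    funext s tile
    have hc := pv_count_eq tile blacks
    have hnn : 0 ≤ count_adjacent_blacks tile blacks := by
      rw [pv_count_eq, pv_counts_eq_counter, PySem.Dict.getD_counter]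
      exact Int.natCast_nonneg _
    simp only [← hc]
    split_ifs <;> first | rfl | omega
  rw [hf]
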